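-- pv_equiv track=rewrite | github.com/cdever01/thermo_geom_tools | dihedral_scanner.py | __make_combs__
-- ===== SOURCE A (Python) =====
-- import itertools
--
-- def __make_combs__(ang, steps, inc):
--     """
--     For 2D scans gets pairs of diheral angles to optimize at.
--     """
--     TSA = []
--     for j in range(len(ang)):
--         SA = []
--         for i in range(steps):
--             SA.append(ang[j] + i * inc)
--         TSA.append(SA)
--     T = list(itertools.product(*TSA))
--     return T
-- ===== SOURCE B (Python) =====
-- def __make_combs__(ang, steps, inc):
--     """
--     Mixed-radix enumeration: combination t is the base-`steps` digits of t's
--     index, decoded least-significant-digit-first over the reversed axes.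
--     """
--     n = len(ang)
--     s = max(steps, 0)
--     T = []
--     for k in range(s ** n):
--         combo = []
--         r = k
--         for j in range(n - 1, -1, -1):
--             r, d = divmod(r, s)
--             combo.append(ang[j] + d * inc)
--         combo.reverse()
--         T.append(tuple(combo))
--     return T
-- ===== Notes on version B (the rewrite author's own statement) =====
-- stated objective: alternative
-- what changed: B drops the intermediate per-axis lists and itertools.product, instead enumerating combination indices k in range(max(steps,0)**len(ang)) and decoding each k as mixed-radix base-steps digits (last axis least significant) via repeated divmod.
import Mathlib
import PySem

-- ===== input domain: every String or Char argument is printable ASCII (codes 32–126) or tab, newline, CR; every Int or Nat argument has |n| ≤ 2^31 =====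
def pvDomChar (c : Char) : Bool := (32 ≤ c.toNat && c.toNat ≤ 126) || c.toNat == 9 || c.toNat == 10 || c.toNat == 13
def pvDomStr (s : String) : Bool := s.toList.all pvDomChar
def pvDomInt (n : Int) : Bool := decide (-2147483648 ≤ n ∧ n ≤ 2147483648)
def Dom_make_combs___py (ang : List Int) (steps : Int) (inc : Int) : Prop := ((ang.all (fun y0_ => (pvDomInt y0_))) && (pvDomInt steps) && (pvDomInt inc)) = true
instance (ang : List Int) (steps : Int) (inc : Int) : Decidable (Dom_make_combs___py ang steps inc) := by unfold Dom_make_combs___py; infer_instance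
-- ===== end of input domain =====

-- B replaces A's intermediate per-axis lists + itertools.product by a direct
-- mixed-radix decoding of each combination's index (objective: alternative).


-- ===== PORT A =====
-- exact port of itertools.product over a list of int-lists (first axis varies slowest)
def pvProduct : List (List Int) → List (List Int)
  | [] => [[]]
  | xs :: rest => xs.flatMap (fun x => (pvProduct rest).map (fun t => x :: t))

def make_combs___py (ang : List Int) (steps : Int) (inc : Int) : List (List Int) :=
  -- TSA loop: for j in range(len(ang)); ang[j] is in range, so pyGetD's default 0 is never used
  let TSA := (PySem.List.pyRange 0 (ang.length : Int)).foldl (fun TSA j =>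
    let SA := (PySem.List.pyRange 0 steps).foldl
      (fun SA i => SA ++ [PySem.List.pyGetD ang j 0 + i * inc]) []
    TSA ++ [SA]) []
  pvProduct TSA

-- ===== PORT B =====
-- inner loop of Source B: walks ang reversed (j = n-1 .. 0), r,d = divmod(r,s);
-- Source B only runs this body when s > 0 (s ** n > 0 and n > 0 force it)
def pvDecodeRev (s inc : Int) : List Int → Int → List Int
  | [], _ => []
  | a :: rest, r => (a + PySem.Int.mod r s * inc) :: pvDecodeRev s inc rest (PySem.Int.floordiv r s)

def make_combs___py_alt (ang : List Int) (steps : Int) (inc : Int) : List (List Int) :=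
  let s := max steps 0
  (PySem.List.pyRange 0 (s ^ ang.length)).foldl
    (fun T k => T ++ [(pvDecodeRev s inc ang.reverse k).reverse]) []

-- ===== PRECONDITION & SPEC =====
def Spec_make_combs___py (ang : List Int) (steps : Int) (inc : Int) (out : List (List Int)) : Prop := out = make_combs___py_alt ang steps inc
instance (ang : List Int) (steps : Int) (inc : Int) (out : List (List Int)) : Decidable (Spec_make_combs___py ang steps inc out) := by unfold Spec_make_combs___py; infer_instance

-- ===== CLAIM (what is proved, stated in full; the proofs are below) =====
def Claim_equal_make_combs___py : Prop := ∀ (ang : List Int) (steps : Int) (inc : Int), Dom_make_combs___py ang steps inc → Spec_make_combs___py ang steps inc (make_combs___py ang steps inc)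

-- ===== LEMMAS AND PROOFS =====

-- Nat-side model of one decoded combination: element at depth j of ang gets
-- digit (k / s'^(length of the remaining axes)) % s'.
def pvF (s' : Nat) (inc : Int) : List Int → Nat → List Int
  | [], _ => []
  | a :: rest, k => (a + ((k / s' ^ rest.length % s' : Nat) : Int) * inc) :: pvF s' inc rest k

lemma pvF_mod (s' : Nat) (inc : Int) :
    ∀ (xs : List Int) (k : Nat), pvF s' inc xs k = pvF s' inc xs (k % s' ^ xs.length) := by
  intro xs
  induction xs with
  | nil => intro k; rfl
  | cons a rest ih =>
    intro k
    simp only [pvF, List.length_cons, List.cons.injEq]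
    refine ⟨?_, ?_⟩
    · have h1 : k % s' ^ (rest.length + 1) / s' ^ rest.length = k / s' ^ rest.length % s' := by
        rw [pow_succ, Nat.mod_mul_right_div_self]
      rw [h1, Nat.mod_mod_of_dvd _ (dvd_refl s')]
    · rw [ih k, ih (k % s' ^ (rest.length + 1))]
      congr 1
      exact (Nat.mod_mod_of_dvd k (pow_dvd_pow s' (Nat.le_succ _))).symm

lemma pvDecodeRev_append (s' : Nat) (inc : Int) :
    ∀ (ys zs : List Int) (k : Nat),
      pvDecodeRev (s' : Int) inc (ys ++ zs) (k : Int) =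
        pvDecodeRev (s' : Int) inc ys (k : Int) ++
          pvDecodeRev (s' : Int) inc zs ((k / s' ^ ys.length : Nat) : Int) := by
  intro ys
  induction ys with
  | nil => intro zs k; simp [pvDecodeRev]
  | cons a ys ih =>
    intro zs k
    simp only [List.cons_append, pvDecodeRev, PySem.Int.floordiv_natCast, List.length_cons]
    rw [ih zs (k / s'), Nat.div_div_eq_div_mul, ← pow_succ']

lemma pvDecodeRev_reverse (s' : Nat) (inc : Int) :
    ∀ (xs : List Int) (k : Nat),
      pvDecodeRev (s' : Int) inc xs.reverse (k : Int) = (pvF s' inc xs k).reverse := by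
  intro xs
  induction xs with
  | nil => intro k; rfl
  | cons a rest ih =>
    intro k
    rw [List.reverse_cons, pvDecodeRev_append s' inc rest.reverse [a] k, ih k]
    have h1 : pvDecodeRev (s' : Int) inc [a] ((k / s' ^ rest.reverse.length : Nat) : Int) =
        [a + ((k / s' ^ rest.length % s' : Nat) : Int) * inc] := by
      simp only [pvDecodeRev, PySem.Int.mod_natCast, List.length_reverse]
    rw [h1]
    simp [pvF]

lemma range_mul_flatMap (s t : Nat) :
    List.range (s * t) = (List.range s).flatMap (fun d => (List.range t).map (fun r => d * t + r)) := by
  induction s with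
  | zero => simp
  | succ s ih =>
    rw [Nat.succ_mul, List.range_add, ih, List.range_succ, List.flatMap_append]
    simp

lemma pvProduct_eq_map_pvF (s' : Nat) (inc : Int) :
    ∀ (ang : List Int),
      pvProduct (ang.map (fun a => (List.range s').map (fun i : Nat => a + (i : Int) * inc))) =
        (List.range (s' ^ ang.length)).map (fun k => pvF s' inc ang k) := by
  intro ang
  induction ang with
  | nil => simp [pvProduct, pvF]
  | cons a rest ih =>
    simp only [List.map_cons, pvProduct, ih, List.length_cons]
    rw [pow_succ' s' rest.length, range_mul_flatMap, List.flatMap_map, List.map_flatMap]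
    apply List.flatMap_congr
    intro d hd
    rw [List.map_map, List.map_map]
    apply List.map_congr_left
    intro r hr
    have hd' : d < s' := List.mem_range.mp hd
    have hr' : r < s' ^ rest.length := List.mem_range.mp hr
    have ht : 0 < s' ^ rest.length := lt_of_le_of_lt (Nat.zero_le r) hr'
    have hs : 0 < s' := lt_of_le_of_lt (Nat.zero_le d) hd'
    simp only [Function.comp_apply, pvF, List.cons.injEq]
    refine ⟨?_, ?_⟩
    · have h1 : (d * s' ^ rest.length + r) / s' ^ rest.length = d := by
        rw [Nat.mul_comm d, Nat.mul_add_div ht, Nat.div_eq_of_lt hr', Nat.add_zero]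
      rw [h1, Nat.mod_eq_of_lt hd']
    · rw [pvF_mod s' inc rest (d * s' ^ rest.length + r), Nat.mul_comm d,
        Nat.mul_add_mod, Nat.mod_eq_of_lt hr']

-- A in closed form: product of the per-axis arithmetic sequences
lemma make_combs___py_eq (ang : List Int) (steps inc : Int) :
    make_combs___py ang steps inc =
      pvProduct (ang.map (fun a => (List.range steps.toNat).map (fun i : Nat => a + (i : Int) * inc))) := by
  simp only [make_combs___py]
  rw [PySem.List.foldl_pyRange_zero_pyGetD' ang 0
    (fun TSA v => TSA ++ [(PySem.List.pyRange 0 steps).foldl (fun SA i => SA ++ [v + i * inc]) []]) []]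
  rw [PySem.List.foldl_append_singleton_eq_map
    (fun v => (PySem.List.pyRange 0 steps).foldl (fun SA i => SA ++ [v + i * inc]) []) ang []]
  rw [List.nil_append]
  congr 1
  apply List.map_congr_left
  intro a _
  rw [PySem.List.foldl_append_singleton_eq_map (fun i => a + i * inc) (PySem.List.pyRange 0 steps) []]
  have hsteps : PySem.List.pyRange 0 steps = PySem.List.pyRange 0 ((steps.toNat : Nat) : Int) := by
    rcases le_or_gt steps 0 with h | h
    · rw [Int.toNat_of_nonpos h, Nat.cast_zero, PySem.List.pyRange_one_eq_nil h,
        PySem.List.pyRange_one_eq_nil (le_refl 0)]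
    · rw [Int.toNat_of_nonneg (le_of_lt h)]
  rw [hsteps, PySem.List.pyRange_zero_natCast, List.map_map, List.nil_append]
  exact List.map_congr_left (fun i _ => rfl)

-- B in closed form: the decoded combinations, over the same Nat radix steps.toNat
lemma make_combs___py_alt_eq (ang : List Int) (steps inc : Int) :
    make_combs___py_alt ang steps inc =
      (List.range (steps.toNat ^ ang.length)).map (fun k => pvF steps.toNat inc ang k) := by
  simp only [make_combs___py_alt]
  have hmax : max steps 0 = (steps.toNat : Int) := (Int.toNat_eq_max steps).symm
  rw [hmax]
  have hpow : ((steps.toNat : Int)) ^ ang.length = ((steps.toNat ^ ang.length : Nat) : Int) := by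
    push_cast; ring
  rw [hpow, PySem.List.foldl_append_singleton_eq_map
    (fun k => (pvDecodeRev (steps.toNat : Int) inc ang.reverse k).reverse)
    (PySem.List.pyRange 0 ((steps.toNat ^ ang.length : Nat) : Int)) [],
    PySem.List.pyRange_zero_natCast, List.map_map]
  simp only [List.nil_append]
  apply List.map_congr_left
  intro k _
  simp only [Function.comp_apply]
  rw [pvDecodeRev_reverse steps.toNat inc ang k, List.reverse_reverse]

theorem make_combs___py_spec : Claim_equal_make_combs___py := by
  intro ang steps inc _
  unfold Spec_make_combs___py
  rw [make_combs___py_eq, make_combs___py_alt_eq, pvProduct_eq_map_pvF]
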